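-- pv_equiv track=rewrite | github.com/sQLs03/Test | chek_df.py | outList
-- ===== SOURCE A (Python) =====
-- str_col_type = ['Original_Crime_Type_Name', 'Report_Date', 'Call_Date',
--                 'Offense_Date', 'Call_Time', 'Call_Date_Time', 'Disposition',
--                 'Address', 'City', 'State', 'Address_Type', 'Common_Location']
--
-- int_col_type = ['Agency_Id']
--
-- def outList(stolb_list: list) -> str:
--     res_str = "Id int IDENTITY(1,1) PRIMARY KEY, \n\t"
--
--     for index, i in enumerate(stolb_list):
--         i = "_".join(i.split())
--
--         if index == len(stolb_list) - 1:
--             if i in int_col_type: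
--                 res_str += f"{i} int NULL \n\t"
--             elif i in str_col_type:
--                 res_str += f"{i} varchar(100) NULL \n\t"
--             else:
--                 res_str += f"Crime_Id int NOT NULL \n\t"
--
--         else:
--             if i in int_col_type:
--                 res_str += f"{i} int NULL,\n\t"
--             elif i in str_col_type:
--                 res_str += f"{i} varchar(100) NULL,\n\t"
--             else:
--                 res_str += f"Crime_Id int NOT NULL,\n\t"
--
--     return res_str
-- ===== SOURCE B (Python) =====
-- str_col_type = ['Original_Crime_Type_Name', 'Report_Date', 'Call_Date',
--                 'Offense_Date', 'Call_Time', 'Call_Date_Time', 'Disposition',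
--                 'Address', 'City', 'State', 'Address_Type', 'Common_Location']
--
-- int_col_type = ['Agency_Id']
--
--
-- def _colPart(col):
--     name = "_".join(col.split())
--     if name in int_col_type:
--         return f"{name} int NULL"
--     if name in str_col_type:
--         return f"{name} varchar(100) NULL"
--     return "Crime_Id int NOT NULL"
--
--
-- def outList(stolb_list: list) -> str:
--     prefix = "Id int IDENTITY(1,1) PRIMARY KEY, \n\t"
--     if not stolb_list:
--         return prefix
--     return prefix + ",\n\t".join(_colPart(c) for c in stolb_list) + " \n\t"
-- ===== Notes on version B (the rewrite author's own statement) =====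
-- stated objective: simpler
-- what changed: Replaces A's enumerate loop with its duplicated last-index/non-last branch by mapping each column to one core fragment and joining the fragments with ',\n\t' (plus an empty-list guard), so the index bookkeeping and branch duplication disappear.
import Mathlib
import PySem

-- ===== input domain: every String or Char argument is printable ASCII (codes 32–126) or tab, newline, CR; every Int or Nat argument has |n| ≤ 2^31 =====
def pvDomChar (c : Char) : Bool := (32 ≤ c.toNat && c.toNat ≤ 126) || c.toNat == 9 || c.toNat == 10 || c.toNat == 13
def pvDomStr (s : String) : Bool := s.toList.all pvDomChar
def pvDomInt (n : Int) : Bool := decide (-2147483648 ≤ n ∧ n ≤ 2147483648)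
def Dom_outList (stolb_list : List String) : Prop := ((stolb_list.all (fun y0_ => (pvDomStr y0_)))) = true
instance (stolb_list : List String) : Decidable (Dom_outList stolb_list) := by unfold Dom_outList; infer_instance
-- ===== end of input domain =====

-- B replaces the enumerate/last-index branch with a single per-column map joined by ",\n\t" (objective: simpler).

-- module-level constants shared by both Python versions
def strColType : List String :=
  ["Original_Crime_Type_Name", "Report_Date", "Call_Date",
   "Offense_Date", "Call_Time", "Call_Date_Time", "Disposition",
   "Address", "City", "State", "Address_Type", "Common_Location"]

def intColType : List String := ["Agency_Id"]

-- ===== PORT A =====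
-- the body of A's for-loop, over state res_str and the enumerate pair (index, i)
def stepA (lastIdx : Int) (res_str : String) (p : Int × String) : String :=
  let i := PySem.Str.join "_" (PySem.Str.split₀ p.2)
  if p.1 = lastIdx then
    if intColType.contains i then res_str ++ i ++ " int NULL \n\t"
    else if strColType.contains i then res_str ++ i ++ " varchar(100) NULL \n\t"
    else res_str ++ "Crime_Id int NOT NULL \n\t"
  else
    if intColType.contains i then res_str ++ i ++ " int NULL,\n\t"
    else if strColType.contains i then res_str ++ i ++ " varchar(100) NULL,\n\t"
    else res_str ++ "Crime_Id int NOT NULL,\n\t"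

def outList (stolb_list : List String) : String :=
  (PySem.List.enumerate stolb_list).foldl
    (stepA ((stolb_list.length : Int) - 1))
    "Id int IDENTITY(1,1) PRIMARY KEY, \n\t"

-- ===== PORT B =====
def colPart (col : String) : String :=
  let name := PySem.Str.join "_" (PySem.Str.split₀ col)
  if intColType.contains name then name ++ " int NULL"
  else if strColType.contains name then name ++ " varchar(100) NULL"
  else "Crime_Id int NOT NULL"

def outList_alt (stolb_list : List String) : String :=
  match stolb_list with
  | [] => "Id int IDENTITY(1,1) PRIMARY KEY, \n\t"
  | _ => "Id int IDENTITY(1,1) PRIMARY KEY, \n\t" ++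
         PySem.Str.join ",\n\t" (stolb_list.map colPart) ++ " \n\t"

-- ===== PRECONDITION & SPEC =====
def Spec_outList (stolb_list : List String) (out : String) : Prop := out = outList_alt stolb_list
instance (stolb_list : List String) (out : String) : Decidable (Spec_outList stolb_list out) := by unfold Spec_outList; infer_instance

-- ===== CLAIM (what is proved, stated in full; the proofs are below) =====
def Claim_equal_outList : Prop := ∀ (stolb_list : List String), Dom_outList stolb_list → Spec_outList stolb_list (outList stolb_list)

-- ===== LEMMAS AND PROOFS =====

theorem strJoin_singleton (sep p : String) : PySem.Str.join sep [p] = p := by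
  apply String.toList_injective
  simp [PySem.Str.toList_join, PySem.Chars.join_singleton]

theorem strJoin_cons_cons (sep p q : String) (rest : List String) :
    PySem.Str.join sep (p :: q :: rest) = p ++ sep ++ PySem.Str.join sep (q :: rest) := by
  apply String.toList_injective
  simp [PySem.Str.toList_join, PySem.Chars.join_cons_cons]

-- A's loop body at the last index appends colPart with a closing " \n\t" …
theorem stepA_last (N : Int) (res : String) (x : String) :
    stepA N res (N, x) = res ++ colPart x ++ " \n\t" := by
  simp only [stepA, colPart, if_pos rfl]
  split_ifs <;> simp [String.append_assoc] <;> rfl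

-- … and at any other index appends colPart with a ",\n\t" separator
theorem stepA_mid (N j : Int) (res : String) (x : String) (h : j ≠ N) :
    stepA N res (j, x) = res ++ colPart x ++ ",\n\t" := by
  simp only [stepA, colPart, if_neg h]
  split_ifs <;> simp [String.append_assoc] <;> rfl

-- the loop of A, started anywhere, produces B's joined form (for nonempty input)
theorem loopA_eq (xs : List String) (s N : Int) (acc : String)
    (hN : N = s + (xs.length : Int) - 1) (hne : xs ≠ []) :
    (PySem.List.enumerate xs s).foldl (stepA N) acc
      = acc ++ PySem.Str.join ",\n\t" (xs.map colPart) ++ " \n\t" := by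
  induction xs generalizing s acc with
  | nil => exact absurd rfl hne
  | cons x rest ih =>
    cases rest with
    | nil =>
      have hs : N = s := by simp at hN; omega
      subst hs
      simp [PySem.List.enumerate_cons, PySem.List.enumerate_nil, stepA_last,
            strJoin_singleton]
    | cons y ys =>
      have hj : s ≠ N := by simp at hN; omega
      rw [PySem.List.enumerate_cons, List.foldl_cons, stepA_mid N s acc x hj,
          ih (s + 1) (acc ++ colPart x ++ ",\n\t") (by simp at hN ⊢; omega)
             (by simp)]
      rw [show List.map colPart (x :: y :: ys)
            = colPart x :: colPart y :: List.map colPart ys from rfl,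
          show List.map colPart (y :: ys) = colPart y :: List.map colPart ys from rfl,
          strJoin_cons_cons]
      simp [String.append_assoc]

-- ===== VERDICT (by name: the statement is the Claim_ definition above) =====
theorem outList_spec : Claim_equal_outList := by
  intro stolb_list _
  unfold Spec_outList outList outList_alt
  cases stolb_list with
  | nil => simp [PySem.List.enumerate_nil]
  | cons x rest =>
    rw [loopA_eq (x :: rest) 0 ((((x :: rest).length : Int)) - 1)
        "Id int IDENTITY(1,1) PRIMARY KEY, \n\t" (by simp) (by simp)]
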